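-- pv_equiv track=rewrite | github.com/AbdulHannan-HAH/apery-poset-metric-app | app.py | compute_apery_set
-- ===== SOURCE A (Python) =====
-- def compute_apery_set(S, m):
--     apery = {}
--     for i in range(m):
--         k = i
--         while k <= max(S) + m:
--             if k in S:
--                 apery[i] = k
--                 break
--             k += m
--     return sorted(apery.values())
-- ===== SOURCE B (Python) =====
-- def compute_apery_set(S, m):
--     if m <= 0:
--         return []
--     limit = max(S) + m
--     members = set(S)
--     found = {}
--     for k in range(limit + 1):
--         r = k % m
--         if r not in found and k in members:
--             found[r] = k
--     return sorted(found.values())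
-- ===== Notes on version B (the rewrite author's own statement) =====
-- stated objective: faster
-- what changed: Instead of an outer loop over residues each re-scanning its arithmetic progression (recomputing max(S) and doing a linear list-membership test at every step), B makes one ascending pass k=0..max(S)+m with max(S) computed once and a hash set for membership, recording the first hit per residue class and returning the sorted recorded values.
import Mathlib
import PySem

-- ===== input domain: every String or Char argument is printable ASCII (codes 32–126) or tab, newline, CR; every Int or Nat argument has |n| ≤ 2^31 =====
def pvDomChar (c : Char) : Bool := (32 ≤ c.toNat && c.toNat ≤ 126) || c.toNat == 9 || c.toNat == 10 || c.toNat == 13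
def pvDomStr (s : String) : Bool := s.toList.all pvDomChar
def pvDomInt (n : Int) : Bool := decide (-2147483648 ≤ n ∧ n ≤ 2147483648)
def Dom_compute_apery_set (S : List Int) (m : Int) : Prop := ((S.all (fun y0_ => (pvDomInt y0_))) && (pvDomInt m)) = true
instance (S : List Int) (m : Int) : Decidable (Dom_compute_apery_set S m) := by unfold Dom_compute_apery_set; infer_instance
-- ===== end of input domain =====

-- B replaces A's per-residue rescans (with max(S) recomputed and a linear membership
-- test at every step) by one ascending pass over 0..max(S)+m with max(S) computed once
-- and set-based membership.

-- ===== PORT A =====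
-- the inner 'while k <= max(S) + m' loop; fuel bounds the iteration count
-- (with 1 ≤ m, fuel = (M + 1 - k).toNat suffices, proved below)
def pvAWhile (S : List Int) (M m : Int) : Int → Nat → Option Int
  | _, 0 => none
  | k, fuel + 1 =>
      if k ≤ M then
        if S.contains k then some k else pvAWhile S M m (k + m) fuel
      else none

-- 'max(S)' is only evaluated when range(m) is nonempty; Pre_ then guarantees S ≠ [],
-- so the '.getD 0' totalization is never observed inside Pre_.
def compute_apery_set (S : List Int) (m : Int) : List Int :=
  let M : Int := (PySem.List.max? S (fun x => x)).getD 0 + m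
  let apery : PySem.Dict Int Int :=
    (PySem.List.pyRange 0 m 1).foldl
      (fun d i =>
        match pvAWhile S M m i (M + 1 - i).toNat with
        | some k => d.insert i k
        | none => d)
      PySem.Dict.empty
  PySem.List.sorted apery.values (fun x => x) false

-- ===== PORT B =====
def compute_apery_set_alt (S : List Int) (m : Int) : List Int :=
  if m ≤ 0 then []
  else
    let limit : Int := (PySem.List.max? S (fun x => x)).getD 0 + m
    let members : PySem.Set Int := PySem.Set.ofList S
    let found : PySem.Dict Int Int :=
      (PySem.List.pyRange 0 (limit + 1) 1).foldl
        (fun d k =>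
          let r := PySem.Int.mod k m
          if ¬ d.contains r ∧ PySem.Set.contains members k then d.insert r k else d)
        PySem.Dict.empty
    PySem.List.sorted found.values (fun x => x) false

-- ===== PRECONDITION & SPEC =====
-- Pre_ excludes exactly the inputs where A raises (ValueError from max(S) on empty S with m ≥ 1).
def Pre_compute_apery_set (S : List Int) (m : Int) : Prop := m ≤ 0 ∨ S ≠ []
instance (S : List Int) (m : Int) : Decidable (Pre_compute_apery_set S m) := by
  unfold Pre_compute_apery_set; infer_instance
def pvWitness_compute_apery_set : List Int × Int := ([7, 5, 11], 4)

def Spec_compute_apery_set (S : List Int) (m : Int) (out : List Int) : Prop := out = compute_apery_set_alt S m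
instance (S : List Int) (m : Int) (out : List Int) : Decidable (Spec_compute_apery_set S m out) := by unfold Spec_compute_apery_set; infer_instance

-- ===== CLAIM (what is proved, stated in full; the proofs are below) =====
def Claim_equal_compute_apery_set : Prop := ∀ (S : List Int) (m : Int), Dom_compute_apery_set S m → Pre_compute_apery_set S m → Spec_compute_apery_set S m (compute_apery_set S m)

-- ===== LEMMAS AND PROOFS =====

-- find? over an ascending integer range returns the least element satisfying p
lemma find?_pyRange_eq_some_iff (p : Int → Bool) (a b v : Int) :
    (PySem.List.pyRange a b 1).find? p = some v ↔
      (p v = true ∧ a ≤ v ∧ v < b ∧ ∀ u, a ≤ u → u < v → p u = false) := by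
  have H : ∀ (n : Nat) (a : Int), (b - a).toNat ≤ n →
      ((PySem.List.pyRange a b 1).find? p = some v ↔
        (p v = true ∧ a ≤ v ∧ v < b ∧ ∀ u, a ≤ u → u < v → p u = false)) := by
    intro n
    induction n with
    | zero =>
      intro a ha
      rw [PySem.List.pyRange_one_eq_nil (by omega)]
      simp only [List.find?_nil]
      constructor
      · intro h; cases h
      · rintro ⟨_, h1, h2, _⟩; omega
    | succ n ih =>
      intro a ha
      by_cases hab : b ≤ a
      · rw [PySem.List.pyRange_one_eq_nil hab]
        simp only [List.find?_nil]
        constructor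
        · intro h; cases h
        · rintro ⟨_, h1, h2, _⟩; omega
      · rw [PySem.List.pyRange_one_cons (by omega)]
        by_cases hpa : p a = true
        · rw [List.find?_cons_of_pos hpa]
          constructor
          · intro h
            have hv : v = a := by cases h; rfl
            subst hv
            exact ⟨hpa, le_rfl, by omega, fun u h1 h2 => absurd h2 (by omega)⟩
          · rintro ⟨hpv, hav, hvb, hmin⟩
            have hva : v = a := by
              by_contra hne
              have := hmin a le_rfl (by omega)
              rw [this] at hpa; cases hpa
            rw [hva]
        · rw [List.find?_cons_of_neg hpa]
          rw [ih (a + 1) (by omega)]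
          have hpa' : p a = false := by
            cases h : p a
            · rfl
            · exact absurd h hpa
          constructor
          · rintro ⟨hpv, hav, hvb, hmin⟩
            refine ⟨hpv, by omega, hvb, fun u h1 h2 => ?_⟩
            by_cases hu : u = a
            · rw [hu]; exact hpa'
            · exact hmin u (by omega) h2
          · rintro ⟨hpv, hav, hvb, hmin⟩
            have hva : v ≠ a := by
              intro h; rw [h] at hpv; rw [hpv] at hpa'; cases hpa'
            exact ⟨hpv, by omega, hvb, fun u h1 h2 => hmin u (by omega) h2⟩
  exact H (b - a).toNat a le_rfl

-- the A-side while loop finds the least element of S in {k, k+m, …} ∩ (-∞, M]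
lemma pvAWhile_eq_some_iff (S : List Int) (M m : Int) (hm : 1 ≤ m) :
    ∀ (fuel : Nat) (k : Int), (M + 1 - k).toNat ≤ fuel → ∀ v,
      (pvAWhile S M m k fuel = some v ↔
        (v ∈ S ∧ k ≤ v ∧ v ≤ M ∧ m ∣ (v - k) ∧
          ∀ u, k ≤ u → u < v → m ∣ (u - k) → u ∉ S)) := by
  intro fuel
  induction fuel with
  | zero =>
    intro k hf v
    simp only [pvAWhile]
    constructor
    · intro h; cases h
    · rintro ⟨_, h1, h2, _, _⟩; omega
  | succ fuel ih =>
    intro k hf v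
    simp only [pvAWhile]
    by_cases hkM : k ≤ M
    · rw [if_pos hkM]
      by_cases hkS : S.contains k = true
      · rw [if_pos hkS]
        have hkmem : k ∈ S := by simpa using hkS
        constructor
        · intro h
          have hv : k = v := by cases h; rfl
          subst hv
          exact ⟨hkmem, le_rfl, hkM, ⟨0, by ring⟩, fun u h1 h2 _ => absurd h2 (by omega)⟩
        · rintro ⟨hvS, hkv, hvM, hdvd, hmin⟩
          have : v = k := by
            by_contra hne
            exact hmin k le_rfl (by omega) ⟨0, by ring⟩ hkmem
          rw [this]
      · rw [if_neg hkS]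
        have hknot : k ∉ S := by simpa using hkS
        rw [ih (k + m) (by omega) v]
        constructor
        · rintro ⟨hvS, hkv, hvM, hdvd, hmin⟩
          obtain ⟨c, hc⟩ := hdvd
          refine ⟨hvS, by omega, hvM, ⟨c + 1, by linarith⟩, fun u h1 h2 hd hu => ?_⟩
          by_cases hueq : u = k
          · rw [hueq] at hu; exact hknot hu
          · have hpos : 0 < u - k := by omega
            have hle : m ≤ u - k := Int.le_of_dvd hpos hd
            have hd' : m ∣ (u - (k + m)) := by
              have he : u - (k + m) = (u - k) - m := by ring
              rw [he]; exact dvd_sub hd dvd_rfl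
            exact hmin u (by omega) h2 hd' hu
        · rintro ⟨hvS, hkv, hvM, hdvd, hmin⟩
          have hvk : v ≠ k := by intro h; rw [h] at hvS; exact hknot hvS
          have hpos : 0 < v - k := by omega
          have hle : m ≤ v - k := Int.le_of_dvd hpos hdvd
          have hd0 : m ∣ (v - (k + m)) := by
            have he : v - (k + m) = (v - k) - m := by ring
            rw [he]; exact dvd_sub hdvd dvd_rfl
          refine ⟨hvS, by omega, hvM, hd0, fun u h1 h2 hd hu => ?_⟩
          have hdk : m ∣ (u - k) := by
            obtain ⟨c, hc⟩ := hd
            exact ⟨c + 1, by linarith⟩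
          exact hmin u (by omega) h2 hdk hu
    · rw [if_neg hkM]
      constructor
      · intro h; cases h
      · rintro ⟨_, h1, h2, _, _⟩; omega

-- a fold of conditional inserts over fresh distinct keys appends its hits
lemma items_foldl_opt (f : Int → Option Int) :
    ∀ (l : List Int) (d : PySem.Dict Int Int),
      (∀ i ∈ l, d.contains i = false) → l.Nodup →
      (l.foldl
          (fun d i =>
            match f i with
            | some k => d.insert i k
            | none => d) d).items
        = d.items ++ l.filterMap (fun i => (f i).map (fun k => (i, k))) := by
  intro l
  induction l with
  | nil => intro d _ _; simp
  | cons i t ih =>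
    intro d hfresh hnd
    rw [List.foldl_cons]
    have hit : i ∉ t := (List.nodup_cons.mp hnd).1
    have hndt : t.Nodup := (List.nodup_cons.mp hnd).2
    cases hfi : f i with
    | none =>
      rw [ih d (fun j hj => hfresh j (List.mem_cons_of_mem i hj)) hndt]
      simp [hfi]
    | some k =>
      have hfreshi : d.contains i = false := hfresh i List.mem_cons_self
      have hfresh' : ∀ j ∈ t, (d.insert i k).contains j = false := by
        intro j hj
        rw [PySem.Dict.contains_insert]
        have hji : (j == i) = false := by
          simp only [beq_eq_false_iff_ne, ne_eq]
          intro h; rw [h] at hj; exact hit hj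
        rw [hji, hfresh j (List.mem_cons_of_mem i hj)]
        rfl
      rw [ih (d.insert i k) hfresh' hndt]
      rw [PySem.Dict.items_insert_of_not_contains (h := hfreshi)]
      simp [hfi]

lemma map_fst_filterMap (f : Int → Option Int) (l : List Int) :
    (l.filterMap (fun i => (f i).map (fun k => (i, k)))).map Prod.fst
      = l.filter (fun i => (f i).isSome) := by
  induction l with
  | nil => simp
  | cons i t ih =>
    cases h : f i <;> simp [h, ih]

-- B's fold computes, at each key r, the first k in the scanned range hitting S in class r
lemma bFold_get? (S : List Int) (m : Int) (n : Nat) (r : Int) :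
    ((PySem.List.pyRange 0 (n : Int) 1).foldl
        (fun d k =>
          if ¬ d.contains (PySem.Int.mod k m) ∧
              PySem.Set.contains (PySem.Set.ofList S) k then
            d.insert (PySem.Int.mod k m) k
          else d)
        PySem.Dict.empty).get? r
      = (PySem.List.pyRange 0 (n : Int) 1).find?
          (fun k => PySem.Set.contains (PySem.Set.ofList S) k && decide (PySem.Int.mod k m = r)) := by
  induction n with
  | zero =>
    rw [Nat.cast_zero, PySem.List.pyRange_one_eq_nil le_rfl]
    simp [PySem.Dict.get?_empty]
  | succ n ih =>
    rw [Nat.cast_succ, PySem.List.pyRange_one_succ_right (by positivity)]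
    rw [List.foldl_append, List.foldl_cons, List.foldl_nil, List.find?_append]
    split_ifs with hcond
    · obtain ⟨hnotc, hmem⟩ := hcond
      have hget_rn :
          ((PySem.List.pyRange 0 (n : Int) 1).foldl
            (fun d k =>
              if ¬ d.contains (PySem.Int.mod k m) ∧
                  PySem.Set.contains (PySem.Set.ofList S) k then
                d.insert (PySem.Int.mod k m) k
              else d)
            PySem.Dict.empty).get? (PySem.Int.mod (n : Int) m) = none := by
        cases h : ((PySem.List.pyRange 0 (n : Int) 1).foldl
            (fun d k =>
              if ¬ d.contains (PySem.Int.mod k m) ∧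
                  PySem.Set.contains (PySem.Set.ofList S) k then
                d.insert (PySem.Int.mod k m) k
              else d)
            PySem.Dict.empty).get? (PySem.Int.mod (n : Int) m) with
        | none => rfl
        | some w =>
          exact absurd (by rw [PySem.Dict.contains_eq_isSome_get?, h]; rfl) hnotc
      rw [PySem.Dict.get?_insert]
      by_cases hr : r = PySem.Int.mod (n : Int) m
      · rw [if_pos hr, ← ih, hr, hget_rn]
        have hmemS : ((n : Nat) : Int) ∈ S := by
          have h1 : ((n : Nat) : Int) ∈ PySem.Set.ofList S := by simpa using hmem
          exact Iff.mp (PySem.Set.mem_ofList S ((n : Nat) : Int)) h1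
        simp [List.find?, hmemS, hr.symm]
      · rw [if_neg hr, ← ih]
        have hne : ¬ (PySem.Int.mod (n : Int) m = r) := fun h => hr h.symm
        have h1 : List.find?
            (fun k => PySem.Set.contains (PySem.Set.ofList S) k && decide (PySem.Int.mod k m = r))
            [(n : Int)] = none := by
          simp [List.find?, hne]
        rw [h1, Option.or_none]
    · rw [← ih]
      by_cases hmem : PySem.Set.contains (PySem.Set.ofList S) (n : Int) = true
      · have hcont : ((PySem.List.pyRange 0 (n : Int) 1).foldl
            (fun d k =>
              if ¬ d.contains (PySem.Int.mod k m) ∧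
                  PySem.Set.contains (PySem.Set.ofList S) k then
                d.insert (PySem.Int.mod k m) k
              else d)
            PySem.Dict.empty).contains (PySem.Int.mod (n : Int) m) = true := by
          by_contra h
          exact hcond ⟨by simpa using h, by simpa using hmem⟩
        by_cases hr : r = PySem.Int.mod (n : Int) m
        · obtain ⟨w, hw⟩ : ∃ w, ((PySem.List.pyRange 0 (n : Int) 1).foldl
              (fun d k =>
                if ¬ d.contains (PySem.Int.mod k m) ∧
                    PySem.Set.contains (PySem.Set.ofList S) k then
                  d.insert (PySem.Int.mod k m) k
                else d)
              PySem.Dict.empty).get? r = some w := by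
            rw [hr]
            rw [PySem.Dict.contains_eq_isSome_get?] at hcont
            exact Option.isSome_iff_exists.mp hcont
          rw [hw]
          rfl
        · have hne : ¬ (PySem.Int.mod (n : Int) m = r) := fun h => hr h.symm
          have h1 : List.find?
              (fun k => PySem.Set.contains (PySem.Set.ofList S) k && decide (PySem.Int.mod k m = r))
              [(n : Int)] = none := by
            simp [List.find?, hne]
          rw [h1, Option.or_none]
      · have hmemS : ((n : Nat) : Int) ∉ S := by
          intro h
          exact hmem (by simpa using Iff.mpr (PySem.Set.mem_ofList S ((n : Nat) : Int)) h)
        have h1 : List.find?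
            (fun k => PySem.Set.contains (PySem.Set.ofList S) k && decide (PySem.Int.mod k m = r))
            [(n : Int)] = none := by
          simp [List.find?, hmemS]
        rw [h1, Option.or_none]

lemma bFold_nodup_keys (S : List Int) (m : Int) (n : Nat) :
    ((PySem.List.pyRange 0 (n : Int) 1).foldl
        (fun d k =>
          if ¬ d.contains (PySem.Int.mod k m) ∧
              PySem.Set.contains (PySem.Set.ofList S) k then
            d.insert (PySem.Int.mod k m) k
          else d)
        PySem.Dict.empty).keys.Nodup := by
  have aux : ∀ (l : List Int) (d : PySem.Dict Int Int), d.keys.Nodup →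
      ((l.foldl
        (fun d k =>
          if ¬ d.contains (PySem.Int.mod k m) ∧
              PySem.Set.contains (PySem.Set.ofList S) k then
            d.insert (PySem.Int.mod k m) k
          else d)
        d).keys.Nodup) := by
    intro l
    induction l with
    | nil => intro d h; simpa
    | cons k t ih =>
      intro d h
      rw [List.foldl_cons]
      apply ih
      split_ifs with hc
      · exact PySem.Dict.nodup_keys_insert _ _ _ h
      · exact h
  exact aux _ _ PySem.Dict.nodup_keys_empty

lemma mod_bridge (m r v : Int) (hm : 0 < m) (hr0 : 0 ≤ r) (hrm : r < m) :
    v % m = r ↔ m ∣ (v - r) := by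
  constructor
  · intro h
    refine ⟨v / m, ?_⟩
    have h2 := Int.emod_add_mul_ediv v m
    linarith
  · rintro ⟨c, hc⟩
    have hv : v = r + m * c := by linarith
    rw [hv, Int.add_mul_emod_self_left, Int.emod_eq_of_lt hr0 hrm]

lemma pyRange_zero_toNat (b : Int) :
    PySem.List.pyRange 0 b 1 = PySem.List.pyRange 0 ((b.toNat : Int)) 1 := by
  have h : (b - 0).toNat = (((b.toNat : Int)) - 0).toNat := by omega
  rw [PySem.List.pyRange_one, PySem.List.pyRange_one, h]

-- ===== VERDICT (by name: the statement is the Claim_ definition above) =====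
theorem compute_apery_set_spec : Claim_equal_compute_apery_set := by
  intro S m _ hpre
  unfold Spec_compute_apery_set
  by_cases hm : m ≤ 0
  · unfold compute_apery_set compute_apery_set_alt
    rw [if_pos hm, PySem.List.pyRange_one_eq_nil hm]
    rfl
  · have hmpos : (0 : Int) < m := by omega
    have hm1 : (1 : Int) ≤ m := by omega
    have hS : S ≠ [] := by
      rcases hpre with h | h
      · exact absurd h hm
      · exact h
    obtain ⟨mx, hmx⟩ : ∃ mx, PySem.List.max? S (fun x => x) = some mx := by
      cases h : PySem.List.max? S (fun x => x) with
      | none => exact absurd h (by simp [PySem.List.max?_eq_none_iff, hS])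
      | some w => exact ⟨w, rfl⟩
    unfold compute_apery_set compute_apery_set_alt
    rw [if_neg hm]
    simp only [hmx, Option.getD_some]
    rw [pyRange_zero_toNat (mx + m + 1)]
    apply PySem.List.sorted_eq_sorted_of_perm _ _ _ (fun a b h => h)
    simp only [PySem.Dict.values]
    apply List.Perm.map
    have hitemsA := items_foldl_opt
      (fun i => pvAWhile S (mx + m) m i (mx + m + 1 - i).toNat)
      (PySem.List.pyRange 0 m 1) PySem.Dict.empty
      (fun i _ => by simp [PySem.Dict.contains_empty])
      (PySem.List.nodup_pyRange_one 0 m)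
    simp only [show (PySem.Dict.empty : PySem.Dict Int Int).items = [] from rfl, List.nil_append] at hitemsA
    have hndkA : ((PySem.List.pyRange 0 m 1).filterMap
        (fun i => (pvAWhile S (mx + m) m i (mx + m + 1 - i).toNat).map
          (fun k => (i, k)))).map Prod.fst |>.Nodup := by
      rw [map_fst_filterMap]
      exact (PySem.List.nodup_pyRange_one 0 m).filter _
    have hndkB := bFold_nodup_keys S m (mx + m + 1).toNat
    simp only [PySem.Dict.keys] at hndkB
    refine (List.perm_ext_iff_of_nodup ?_ ?_).mpr ?_
    · rw [hitemsA]
      exact hndkA.of_map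
    · exact hndkB.of_map
    · rintro ⟨r, v⟩
      rw [hitemsA]
      -- characterize membership on the A side
      have hAiff : ((r, v) ∈ (PySem.List.pyRange 0 m 1).filterMap
            (fun i => (pvAWhile S (mx + m) m i (mx + m + 1 - i).toNat).map
              (fun k => (i, k)))) ↔
          (0 ≤ r ∧ r < m ∧ pvAWhile S (mx + m) m r (mx + m + 1 - r).toNat = some v) := by
        rw [List.mem_filterMap]
        constructor
        · rintro ⟨i, hi, hmap⟩
          rw [Option.map_eq_some_iff] at hmap
          obtain ⟨k, hk, hpair⟩ := hmap
          cases hpair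
          rw [PySem.List.mem_pyRange_one] at hi
          exact ⟨hi.1, hi.2, hk⟩
        · rintro ⟨hr0, hrm, hf⟩
          exact ⟨r, PySem.List.mem_pyRange_one.mpr ⟨hr0, hrm⟩, by rw [hf]; rfl⟩
      -- characterize membership on the B side
      have hBiff : ((r, v) ∈ (((PySem.List.pyRange 0 (((mx + m + 1).toNat : Nat) : Int) 1).foldl
            (fun d k =>
              if ¬ d.contains (PySem.Int.mod k m) ∧
                  PySem.Set.contains (PySem.Set.ofList S) k then
                d.insert (PySem.Int.mod k m) k
              else d)
            PySem.Dict.empty).items)) ↔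
          ((PySem.List.pyRange 0 (((mx + m + 1).toNat : Nat) : Int) 1).find?
            (fun k => PySem.Set.contains (PySem.Set.ofList S) k &&
              decide (PySem.Int.mod k m = r)) = some v) := by
        rw [← bFold_get? S m (mx + m + 1).toNat r]
        constructor
        · intro hmem
          exact PySem.Dict.get?_of_mem_items (h := hmem) (hnd := by
            simpa only [PySem.Dict.keys] using bFold_nodup_keys S m (mx + m + 1).toNat)
        · intro hget
          exact PySem.Dict.mem_items_of_get?_eq_some (h := hget)
      rw [hAiff, hBiff, find?_pyRange_eq_some_iff]
      -- boolean-predicate bridges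
      have hp : ∀ x : Int, (PySem.Set.contains (PySem.Set.ofList S) x &&
          decide (PySem.Int.mod x m = r)) = true ↔ (x ∈ S ∧ x % m = r) := by
        intro x
        rw [Bool.and_eq_true, decide_eq_true_eq, PySem.Int.mod_eq_emod_of_pos hmpos,
          PySem.Set.contains_iff, PySem.Set.mem_ofList S x]
      have hp' : ∀ x : Int, (PySem.Set.contains (PySem.Set.ofList S) x &&
          decide (PySem.Int.mod x m = r)) = false ↔ ¬ (x ∈ S ∧ x % m = r) := by
        intro x
        rw [Bool.eq_false_iff]
        exact not_congr (hp x)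
      rw [pvAWhile_eq_some_iff S (mx + m) m hm1 (mx + m + 1 - r).toNat r le_rfl v]
      constructor
      · rintro ⟨hr0, hrm, hvS, hrv, hvM, hdvd, hmin⟩
        have hvmod : v % m = r := (mod_bridge m r v hmpos hr0 hrm).mpr hdvd
        refine ⟨(hp v).mpr ⟨hvS, hvmod⟩, by omega, by omega, fun u hu0 huv => ?_⟩
        refine (hp' u).mpr ?_
        rintro ⟨huS, humod⟩
        have hdu : m ∣ (u - r) := (mod_bridge m r u hmpos hr0 hrm).mp humod
        have hru : r ≤ u := by
          by_contra hlt
          push_neg at hlt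
          have hpos : 0 < r - u := by omega
          have hdvd2 : m ∣ (r - u) := by
            have he : r - u = -(u - r) := by ring
            rw [he]; exact dvd_neg.mpr hdu
          have := Int.le_of_dvd hpos hdvd2
          omega
        exact hmin u hru huv hdu huS
      · rintro ⟨hpv, hv0, hvB, hminB⟩
        obtain ⟨hvS, hvmod⟩ := (hp v).mp hpv
        have hr0 : 0 ≤ r := by rw [← hvmod]; exact Int.emod_nonneg v (by omega)
        have hrm : r < m := by rw [← hvmod]; exact Int.emod_lt_of_pos v hmpos
        have hdvd : m ∣ (v - r) := (mod_bridge m r v hmpos hr0 hrm).mp hvmod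
        have hrv : r ≤ v := by
          by_contra hlt
          push_neg at hlt
          have hpos : 0 < r - v := by omega
          have hdvd2 : m ∣ (r - v) := by
            have he : r - v = -(v - r) := by ring
            rw [he]; exact dvd_neg.mpr hdvd
          have := Int.le_of_dvd hpos hdvd2
          omega
        refine ⟨hr0, hrm, hvS, hrv, by omega, hdvd, fun u hru huv hdu huS => ?_⟩
        have humod : u % m = r := (mod_bridge m r u hmpos hr0 hrm).mpr hdu
        exact (hp' u).mp (hminB u (by omega) huv) ⟨huS, humod⟩
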